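-- pv_equiv track=rewrite | github.com/Munikumar09/tailor | backend/utils/keyword_gap_analyzer.py | lexical_prefilter
-- ===== SOURCE A (Python) =====
-- from typing import Callable, Dict, List, Optional, Set, Tuple
--
-- def stem_set(tokens: List[str]) -> Set[str]:
--     """Rough stem: strip common suffixes for overlap checks."""
--     stems = set()
--     for t in tokens:
--         s = t
--         for suffix in ("ing", "tion", "ed", "er", "es", "s"):
--             if t.endswith(suffix) and len(t) - len(suffix) >= 3:
--                 s = t[: -len(suffix)]
--                 break
--         stems.add(s)
--     return stems
--
-- def lexical_prefilter(
--     jd_terms: List[str],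
--     resume_phrases: List[str],
-- ) -> Dict[str, List[str]]:
--     """
--     Returns {jd_term: [candidate_resume_phrases]} after lexical pre-filtering.
--     Only pairs that pass at least one lexical signal are returned.
--     """
--     # Pre-compute token sets and stem sets for all resume phrases
--     resume_tokens: List[Set[str]] = [set(p.split()) for p in resume_phrases]
--     resume_stems: List[Set[str]] = [stem_set(p.split()) for p in resume_phrases]
--
--     candidates: Dict[str, List[str]] = {}
--
--     for jd_term in jd_terms:
--         jd_tok = set(jd_term.split())
--         jd_stem = stem_set(list(jd_tok))
--         first_token = jd_term.split()[0] if jd_term.split() else ""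
--
--         matched: List[str] = []
--         for i, phrase in enumerate(resume_phrases):
--             r_tok = resume_tokens[i]
--             r_stem = resume_stems[i]
--
--             # Signal 1: Jaccard token overlap > 0
--             if jd_tok & r_tok:
--                 matched.append(phrase)
--                 continue
--
--             # Signal 2: First token of JD term appears anywhere in resume phrase
--             if first_token and first_token in r_tok:
--                 matched.append(phrase)
--                 continue
--
--             # Signal 3: Stem overlap
--             if jd_stem & r_stem:
--                 matched.append(phrase)
--
--         if matched:
--             candidates[jd_term] = matched
--
--     return candidates
-- ===== SOURCE B (Python) =====
-- _SUFFIXES = ("ing", "tion", "ed", "er", "es", "s")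
--
--
-- def _stem(token):
--     """Rough stem of a single token: strip the first matching common suffix."""
--     for sf in _SUFFIXES:
--         if token.endswith(sf) and len(token) - len(sf) >= 3:
--             return token[: -len(sf)]
--     return token
--
--
-- def _index(key_sets):
--     """Inverted index: key -> list of positions whose key-set contains it."""
--     idx = {}
--     for i, keys in enumerate(key_sets):
--         for k in keys:
--             idx[k] = idx.get(k, []) + [i]
--     return idx
--
--
-- def lexical_prefilter(jd_terms, resume_phrases):
--     tok_sets = [set(p.split()) for p in resume_phrases]
--     stem_sets = [{_stem(t) for t in ts} for ts in tok_sets]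
--     tok_index = _index(tok_sets)
--     stem_index = _index(stem_sets)
--
--     candidates = {}
--     for term in jd_terms:
--         toks = set(term.split())
--         hit = set()
--         for t in toks:
--             hit.update(tok_index.get(t, []))
--             hit.update(stem_index.get(_stem(t), []))
--         if hit:
--             candidates[term] = [resume_phrases[i] for i in sorted(hit)]
--     return candidates
-- ===== Notes on version B (the rewrite author's own statement) =====
-- stated objective: faster
-- what changed: Replaces A's per-(JD term, resume phrase) nested scan with two inverted indexes (token -> phrase positions, stem -> phrase positions) built once; each JD term then unions the posting lists of its tokens/stems and emits the hit phrases in index order.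
import Mathlib
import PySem

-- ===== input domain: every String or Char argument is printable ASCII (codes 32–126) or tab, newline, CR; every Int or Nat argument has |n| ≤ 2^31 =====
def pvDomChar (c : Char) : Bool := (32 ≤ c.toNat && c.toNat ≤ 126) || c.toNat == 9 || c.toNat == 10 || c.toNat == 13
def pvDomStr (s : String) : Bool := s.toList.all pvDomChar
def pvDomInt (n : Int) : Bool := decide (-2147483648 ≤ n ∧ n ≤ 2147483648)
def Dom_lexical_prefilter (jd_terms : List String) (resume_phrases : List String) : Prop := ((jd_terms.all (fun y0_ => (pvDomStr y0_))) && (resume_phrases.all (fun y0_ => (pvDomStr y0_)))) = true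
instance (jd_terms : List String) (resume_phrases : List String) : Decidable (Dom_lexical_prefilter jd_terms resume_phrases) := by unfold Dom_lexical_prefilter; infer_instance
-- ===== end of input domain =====

-- B replaces A's per-(term, phrase) scan by two inverted indexes (token → positions, stem → positions)
-- built once, then unions posting lists per JD term and emits the hits in index order
-- (same return value, proved below).

-- ===== PORT A =====
-- the literal suffix tuple of stem_set
def stemSuffixesA : List String := ["ing", "tion", "ed", "er", "es", "s"]

-- stem_set's inner suffix loop for one token t: first matching suffix (the break), stripped
def stemTokenA (t : String) : String :=
  match stemSuffixesA.find? (fun suffix =>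
      PySem.Str.endswith t suffix && decide (3 ≤ PySem.Str.len t - PySem.Str.len suffix)) with
  | some suffix => PySem.Str.slice t none (some (-(PySem.Str.len suffix)))
  | none => t

def stem_set (tokens : List String) : PySem.Set String :=
  tokens.foldl (fun stems t => PySem.Set.add stems (stemTokenA t)) PySem.Set.empty

def lexical_prefilter (jd_terms : List String) (resume_phrases : List String) :
    List (String × List String) :=
  let resume_tokens : List (PySem.Set String) :=
    resume_phrases.map (fun p => PySem.Set.ofList (PySem.Str.split₀ p))
  let resume_stems : List (PySem.Set String) :=
    resume_phrases.map (fun p => stem_set (PySem.Str.split₀ p))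
  let candidates : PySem.Dict String (List String) :=
    jd_terms.foldl (fun candidates jd_term =>
      let jd_tok : PySem.Set String := PySem.Set.ofList (PySem.Str.split₀ jd_term)
      let jd_stem : PySem.Set String := stem_set jd_tok
      let first_token : String :=
        match PySem.Str.split₀ jd_term with
        | [] => ""
        | h :: _ => h
      let matched : List String :=
        (PySem.List.enumerate resume_phrases).foldl (fun matched ip =>
          -- resume_tokens[i] / resume_stems[i]: i comes from enumerate, always in range
          let r_tok := (PySem.List.pyGet? resume_tokens ip.1).getD PySem.Set.empty
          let r_stem := (PySem.List.pyGet? resume_stems ip.1).getD PySem.Set.empty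
          if !(PySem.Set.inter jd_tok r_tok).isEmpty then matched ++ [ip.2]
          else if (first_token != "") && PySem.Set.contains r_tok first_token then matched ++ [ip.2]
          else if !(PySem.Set.inter jd_stem r_stem).isEmpty then matched ++ [ip.2]
          else matched) []
      if matched ≠ [] then candidates.insert jd_term matched else candidates)
      PySem.Dict.empty
  candidates.items

-- ===== PORT B =====
def stemSuffixesB : List String := ["ing", "tion", "ed", "er", "es", "s"]

-- _stem's loop over the suffix tuple, with its early return
def stemLoopB : List String → String → String
  | [], token => token
  | sf :: rest, token =>
    if PySem.Str.endswith token sf && decide (3 ≤ PySem.Str.len token - PySem.Str.len sf) then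
      PySem.Str.slice token none (some (-(PySem.Str.len sf)))
    else stemLoopB rest token

def stemToken (token : String) : String := stemLoopB stemSuffixesB token

-- _index: inverted index key → list of positions whose key-set contains it
def buildIndex (key_sets : List (PySem.Set String)) : PySem.Dict String (List Int) :=
  (PySem.List.enumerate key_sets).foldl (fun idx ik =>
    ik.2.foldl (fun idx k => idx.insert k (idx.getD k [] ++ [ik.1])) idx)
    PySem.Dict.empty

def lexical_prefilter_alt (jd_terms : List String) (resume_phrases : List String) :
    List (String × List String) :=
  let tok_sets : List (PySem.Set String) :=
    resume_phrases.map (fun p => PySem.Set.ofList (PySem.Str.split₀ p))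
  let stem_sets : List (PySem.Set String) :=
    tok_sets.map (fun ts => PySem.Set.ofList (ts.map stemToken))
  let tok_index := buildIndex tok_sets
  let stem_index := buildIndex stem_sets
  (jd_terms.foldl (fun (candidates : PySem.Dict String (List String)) term =>
    let toks : PySem.Set String := PySem.Set.ofList (PySem.Str.split₀ term)
    let hit : PySem.Set Int := toks.foldl (fun hit t =>
      PySem.Set.update (PySem.Set.update hit (tok_index.getD t []))
        (stem_index.getD (stemToken t) [])) PySem.Set.empty
    if hit.isEmpty then candidates
    else candidates.insert term
      ((PySem.List.sorted hit (fun i => i)).map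
        (fun i => (PySem.List.pyGet? resume_phrases i).getD ""))
    ) PySem.Dict.empty).items

-- ===== PRECONDITION & SPEC =====
def Spec_lexical_prefilter (jd_terms : List String) (resume_phrases : List String) (out : List (String × List String)) : Prop := out = lexical_prefilter_alt jd_terms resume_phrases
instance (jd_terms : List String) (resume_phrases : List String) (out : List (String × List String)) : Decidable (Spec_lexical_prefilter jd_terms resume_phrases out) := by unfold Spec_lexical_prefilter; infer_instance

-- ===== CLAIM (what is proved, stated in full; the proofs are below) =====
def Claim_equal_lexical_prefilter : Prop := ∀ (jd_terms : List String) (resume_phrases : List String), Dom_lexical_prefilter jd_terms resume_phrases → Spec_lexical_prefilter jd_terms resume_phrases (lexical_prefilter jd_terms resume_phrases)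

-- ===== LEMMAS AND PROOFS =====

-- the two stem helpers agree
theorem stemLoopB_eq_find (l : List String) (t : String) :
    stemLoopB l t =
      (match l.find? (fun suffix =>
          PySem.Str.endswith t suffix && decide (3 ≤ PySem.Str.len t - PySem.Str.len suffix)) with
        | some suffix => PySem.Str.slice t none (some (-(PySem.Str.len suffix)))
        | none => t) := by
  induction l with
  | nil => rfl
  | cons sf rest ih =>
    rw [List.find?_cons]
    cases h : (PySem.Str.endswith t sf && decide (3 ≤ PySem.Str.len t - PySem.Str.len sf)) with
    | true => simp only [stemLoopB, if_pos h]
    | false => simp only [stemLoopB, h, Bool.false_eq_true, if_false, ih]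

theorem stemTokenA_eq (t : String) : stemTokenA t = stemToken t := by
  rw [stemToken, stemLoopB_eq_find]; rfl

-- membership in stem_set
theorem mem_stem_set (s : String) (ts : List String) :
    s ∈ stem_set ts ↔ ∃ t ∈ ts, s = stemToken t := by
  unfold stem_set
  rw [PySem.Set.mem_foldl_add]
  simp [stemTokenA_eq, PySem.Set.empty]

-- nonemptiness of a set intersection
theorem inter_not_isEmpty {α : Type} [BEq α] [LawfulBEq α] (s t : PySem.Set α) :
    ((PySem.Set.inter s t).isEmpty = false) ↔ ∃ x ∈ s, x ∈ t := by
  rw [List.isEmpty_eq_false_iff_exists_mem]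
  constructor
  · rintro ⟨x, hx⟩
    rw [PySem.Set.mem_inter] at hx
    exact ⟨x, hx.1, hx.2⟩
  · rintro ⟨x, hs, ht⟩
    exact ⟨x, (PySem.Set.mem_inter s t x).2 ⟨hs, ht⟩⟩

-- the inner posting-list loop of buildIndex
theorem innerIndex_mem (ks : List String) (d : PySem.Dict String (List Int))
    (j : Int) (k : String) (i : Int) :
    i ∈ (ks.foldl (fun idx k' => idx.insert k' (idx.getD k' [] ++ [j])) d).getD k [] ↔
      i ∈ d.getD k [] ∨ (i = j ∧ k ∈ ks) := by
  induction ks generalizing d with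
  | nil => simp
  | cons k' rest ih =>
    simp only [List.foldl_cons, ih, PySem.Dict.getD_insert, List.mem_cons]
    by_cases hk : k = k' <;> simp [hk] <;> tauto

-- membership in a built index
theorem buildIndex_loop_mem (l : List (Int × PySem.Set String))
    (d : PySem.Dict String (List Int)) (k : String) (i : Int) :
    i ∈ (l.foldl (fun idx ik =>
        ik.2.foldl (fun idx k' => idx.insert k' (idx.getD k' [] ++ [ik.1])) idx) d).getD k [] ↔
      i ∈ d.getD k [] ∨ ∃ p ∈ l, i = p.1 ∧ k ∈ p.2 := by
  induction l generalizing d with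
  | nil => simp
  | cons p rest ih =>
    simp only [List.foldl_cons, ih, innerIndex_mem, List.mem_cons, exists_eq_or_imp]
    tauto

theorem buildIndex_mem (key_sets : List (PySem.Set String)) (k : String) (i : Int) :
    i ∈ (buildIndex key_sets).getD k [] ↔
      ∃ j : Nat, ∃ _ : j < key_sets.length, i = (j : Int) ∧ k ∈ key_sets[j] := by
  unfold buildIndex
  rw [buildIndex_loop_mem]
  simp only [PySem.Dict.getD_empty, List.not_mem_nil, false_or]
  constructor
  · rintro ⟨p, hp, hi, hk⟩
    rw [PySem.List.mem_enumerate_iff] at hp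
    obtain ⟨j, hj, rfl⟩ := hp
    exact ⟨j, hj, by simpa using hi, hk⟩
  · rintro ⟨j, hj, hi, hk⟩
    exact ⟨((j : Int), key_sets[j]),
      (PySem.List.mem_enumerate_iff key_sets 0 _).2 ⟨j, hj, by simp⟩, by simpa using hi, hk⟩

-- membership in the hit set
theorem hit_mem (toks : List String) (f g : String → List Int) (h0 : PySem.Set Int) (i : Int) :
    i ∈ toks.foldl (fun hit t => PySem.Set.update (PySem.Set.update hit (f t)) (g t)) h0 ↔
      i ∈ h0 ∨ ∃ t ∈ toks, i ∈ f t ∨ i ∈ g t := by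
  induction toks generalizing h0 with
  | nil => simp
  | cons t rest ih =>
    simp only [List.foldl_cons, ih, PySem.Set.mem_update, List.mem_cons, exists_eq_or_imp,
      or_assoc]

theorem hit_nodup (toks : List String) (f g : String → List Int) (h0 : PySem.Set Int)
    (h : h0.Nodup) :
    (toks.foldl (fun hit t => PySem.Set.update (PySem.Set.update hit (f t)) (g t)) h0).Nodup := by
  induction toks generalizing h0 with
  | nil => exact h
  | cons t rest ih =>
    exact ih _ (PySem.Set.nodup_update _ _ (PySem.Set.nodup_update _ _ h))

-- A's inner loop over enumerate is a filter (given consistent index lookups)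
theorem loopA_filter (resume_tokens resume_stems : List (PySem.Set String))
    (f g : String → PySem.Set String) (c : String → Bool)
    (jd_tok jd_stem : PySem.Set String) (first_token : String)
    (hc : ∀ p, c p = (!(PySem.Set.inter jd_tok (f p)).isEmpty
        || ((first_token != "") && PySem.Set.contains (f p) first_token)
        || !(PySem.Set.inter jd_stem (g p)).isEmpty))
    (l : List (Int × String)) (acc : List String)
    (hl : ∀ p ∈ l, PySem.List.pyGet? resume_tokens p.1 = some (f p.2) ∧
        PySem.List.pyGet? resume_stems p.1 = some (g p.2)) :
    l.foldl (fun matched ip =>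
        let r_tok := (PySem.List.pyGet? resume_tokens ip.1).getD PySem.Set.empty
        let r_stem := (PySem.List.pyGet? resume_stems ip.1).getD PySem.Set.empty
        if !(PySem.Set.inter jd_tok r_tok).isEmpty then matched ++ [ip.2]
        else if (first_token != "") && PySem.Set.contains r_tok first_token then matched ++ [ip.2]
        else if !(PySem.Set.inter jd_stem r_stem).isEmpty then matched ++ [ip.2]
        else matched) acc =
      acc ++ (l.map (·.2)).filter c := by
  induction l generalizing acc with
  | nil => simp
  | cons p rest ih =>
    obtain ⟨h1, h2⟩ := hl p (by simp)
    rw [List.foldl_cons, ih _ (fun q hq => hl q (List.mem_cons_of_mem _ hq)),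
      List.map_cons, List.filter_cons]
    simp only [h1, h2, Option.getD_some, hc]
    by_cases p1 : PySem.Set.inter jd_tok (f p.2) = []
    · by_cases p2 : ¬first_token = "" ∧ first_token ∈ f p.2
      · simp [p1, p2, List.append_assoc]
      · by_cases p3 : PySem.Set.inter jd_stem (g p.2) = []
        · simp [p1, p2, p3]
        · simp [p1, p2, p3, List.append_assoc]
    · simp [p1, List.append_assoc]

-- mapping positions back to elements
theorem filter_range_map (xs : List String) (p : String → Bool) :
    ((List.range xs.length).filter (fun j => p (xs.getD j ""))).map (fun j => xs.getD j "") =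
      xs.filter p := by
  induction xs with
  | nil => rfl
  | cons x rest ih =>
    rw [List.length_cons, List.range_succ_eq_map, List.filter_cons]
    have h1 : ((fun j => p ((x :: rest).getD j "")) ∘ Nat.succ) = (fun j => p (rest.getD j "")) := by
      funext j; simp
    have h2 : ((fun j => (x :: rest).getD j "") ∘ Nat.succ) = (fun j => rest.getD j "") := by
      funext j; simp
    by_cases h : p ((x :: rest).getD 0 "") = true
    · rw [if_pos h, List.map_cons, List.filter_map, List.map_map, List.filter_cons]
      simp only [List.getD_cons_zero] at h
      rw [if_pos h, h1, h2, ih]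
      simp
    · rw [if_neg h, List.filter_map, List.map_map, List.filter_cons]
      simp only [List.getD_cons_zero] at h
      rw [if_neg h, h1, h2, ih]

-- the two per-JD-term loop bodies (proof-local names for the fold steps of the two ports)
def stepA (res : List String) (candidates : PySem.Dict String (List String)) (jd_term : String) :
    PySem.Dict String (List String) :=
  if ((PySem.List.enumerate res).foldl (fun matched ip =>
      let r_tok := (PySem.List.pyGet?
        (res.map (fun p => PySem.Set.ofList (PySem.Str.split₀ p))) ip.1).getD PySem.Set.empty
      let r_stem := (PySem.List.pyGet?
        (res.map (fun p => stem_set (PySem.Str.split₀ p))) ip.1).getD PySem.Set.empty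
      if !(PySem.Set.inter (PySem.Set.ofList (PySem.Str.split₀ jd_term)) r_tok).isEmpty then
        matched ++ [ip.2]
      else if ((match PySem.Str.split₀ jd_term with
          | [] => ""
          | h :: _ => h) != "") && PySem.Set.contains r_tok (match PySem.Str.split₀ jd_term with
          | [] => ""
          | h :: _ => h) then matched ++ [ip.2]
      else if !(PySem.Set.inter (stem_set (PySem.Set.ofList (PySem.Str.split₀ jd_term)))
          r_stem).isEmpty then matched ++ [ip.2]
      else matched) []) ≠ [] then
    candidates.insert jd_term ((PySem.List.enumerate res).foldl (fun matched ip =>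
      let r_tok := (PySem.List.pyGet?
        (res.map (fun p => PySem.Set.ofList (PySem.Str.split₀ p))) ip.1).getD PySem.Set.empty
      let r_stem := (PySem.List.pyGet?
        (res.map (fun p => stem_set (PySem.Str.split₀ p))) ip.1).getD PySem.Set.empty
      if !(PySem.Set.inter (PySem.Set.ofList (PySem.Str.split₀ jd_term)) r_tok).isEmpty then
        matched ++ [ip.2]
      else if ((match PySem.Str.split₀ jd_term with
          | [] => ""
          | h :: _ => h) != "") && PySem.Set.contains r_tok (match PySem.Str.split₀ jd_term with
          | [] => ""
          | h :: _ => h) then matched ++ [ip.2]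
      else if !(PySem.Set.inter (stem_set (PySem.Set.ofList (PySem.Str.split₀ jd_term)))
          r_stem).isEmpty then matched ++ [ip.2]
      else matched) [])
  else candidates

def stepB (res : List String) (candidates : PySem.Dict String (List String)) (term : String) :
    PySem.Dict String (List String) :=
  if ((PySem.Set.ofList (PySem.Str.split₀ term)).foldl (fun hit t =>
      PySem.Set.update
        (PySem.Set.update hit
          ((buildIndex (res.map (fun p => PySem.Set.ofList (PySem.Str.split₀ p)))).getD t []))
        ((buildIndex ((res.map (fun p => PySem.Set.ofList (PySem.Str.split₀ p))).map
            (fun ts => PySem.Set.ofList (ts.map stemToken)))).getD (stemToken t) []))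
      PySem.Set.empty).isEmpty then candidates
  else candidates.insert term
    ((PySem.List.sorted ((PySem.Set.ofList (PySem.Str.split₀ term)).foldl (fun hit t =>
      PySem.Set.update
        (PySem.Set.update hit
          ((buildIndex (res.map (fun p => PySem.Set.ofList (PySem.Str.split₀ p)))).getD t []))
        ((buildIndex ((res.map (fun p => PySem.Set.ofList (PySem.Str.split₀ p))).map
            (fun ts => PySem.Set.ofList (ts.map stemToken)))).getD (stemToken t) []))
      PySem.Set.empty) (fun i => i)).map
      (fun i => (PySem.List.pyGet? res i).getD ""))

theorem lexical_prefilter_eq_foldl (jd res : List String) :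
    lexical_prefilter jd res = (jd.foldl (stepA res) PySem.Dict.empty).items := rfl

theorem lexical_prefilter_alt_eq_foldl (jd res : List String) :
    lexical_prefilter_alt jd res = (jd.foldl (stepB res) PySem.Dict.empty).items := rfl

-- the lexical condition A tests for one resume phrase, as one canonical proposition
theorem step_eq (res : List String) (d : PySem.Dict String (List String)) (term : String) :
    stepA res d term = stepB res d term := by
  unfold stepA stepB
  set jd_tok : PySem.Set String := PySem.Set.ofList (PySem.Str.split₀ term) with hjdtok
  set jd_stem : PySem.Set String := stem_set jd_tok with hjdstem
  set first_token : String :=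
    (match PySem.Str.split₀ term with
      | [] => ""
      | h :: _ => h) with hfirst
  set c : String → Bool := fun p =>
    (!(PySem.Set.inter jd_tok (PySem.Set.ofList (PySem.Str.split₀ p))).isEmpty
      || ((first_token != "") &&
          PySem.Set.contains (PySem.Set.ofList (PySem.Str.split₀ p)) first_token)
      || !(PySem.Set.inter jd_stem (stem_set (PySem.Str.split₀ p))).isEmpty) with hc
  -- canonical form of the per-phrase condition
  have hcond : ∀ p : String, c p = true ↔
      ∃ t ∈ PySem.Str.split₀ term, t ∈ PySem.Str.split₀ p ∨
        ∃ u ∈ PySem.Str.split₀ p, stemToken t = stemToken u := by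
    intro p
    rw [hc]
    simp only [Bool.or_eq_true, Bool.and_eq_true, bne_iff_ne, ne_eq,
      Bool.not_eq_eq_eq_not, Bool.not_true, inter_not_isEmpty, PySem.Set.contains_iff]
    constructor
    · rintro ((⟨x, hx, hxp⟩ | ⟨hne, hfp⟩) | ⟨x, hx, hxp⟩)
      · exact ⟨x, (PySem.Set.mem_ofList _ _).1 hx, Or.inl ((PySem.Set.mem_ofList _ _).1 hxp)⟩
      · refine ⟨first_token, ?_, Or.inl ((PySem.Set.mem_ofList _ _).1 hfp)⟩
        cases hsp : PySem.Str.split₀ term with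
        | nil =>
          rw [hsp] at hfirst
          exact absurd hfirst hne
        | cons h rest =>
          rw [hsp] at hfirst
          rw [hfirst]
          exact (show h ∈ h :: rest by simp)
      · rw [hjdstem, mem_stem_set] at hx
        obtain ⟨t, ht, rfl⟩ := hx
        rw [hjdtok, PySem.Set.mem_ofList] at ht
        rw [mem_stem_set] at hxp
        obtain ⟨u, hu, he⟩ := hxp
        exact ⟨t, ht, Or.inr ⟨u, hu, he⟩⟩
    · rintro ⟨t, ht, hx | ⟨u, hu, hsu⟩⟩
      · exact Or.inl (Or.inl ⟨t, (PySem.Set.mem_ofList _ _).2 ht, (PySem.Set.mem_ofList _ _).2 hx⟩)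
      · refine Or.inr ⟨stemToken t, ?_, ?_⟩
        · rw [hjdstem, mem_stem_set]
          exact ⟨t, (PySem.Set.mem_ofList _ _).2 ht, rfl⟩
        · rw [mem_stem_set]
          exact ⟨u, hu, hsu⟩
  -- A's matched list is a filter over the phrases
  have hmatched :
      (PySem.List.enumerate res).foldl (fun matched (ip : Int × String) =>
        let r_tok := (PySem.List.pyGet?
          (res.map (fun p => PySem.Set.ofList (PySem.Str.split₀ p))) ip.1).getD PySem.Set.empty
        let r_stem := (PySem.List.pyGet?
          (res.map (fun p => stem_set (PySem.Str.split₀ p))) ip.1).getD PySem.Set.empty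
        if !(PySem.Set.inter jd_tok r_tok).isEmpty then matched ++ [ip.2]
        else if (first_token != "") && PySem.Set.contains r_tok first_token then matched ++ [ip.2]
        else if !(PySem.Set.inter jd_stem r_stem).isEmpty then matched ++ [ip.2]
        else matched) [] = res.filter c := by
    rw [loopA_filter _ _ (fun p => PySem.Set.ofList (PySem.Str.split₀ p))
      (fun p => stem_set (PySem.Str.split₀ p)) c jd_tok jd_stem first_token (fun p => rfl)
      (PySem.List.enumerate res) []
      ?_]
    · rw [PySem.List.map_snd_enumerate, List.nil_append]
    · intro p hp
      rw [PySem.List.mem_enumerate_iff] at hp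
      obtain ⟨k, hk, rfl⟩ := hp
      constructor
      · show PySem.List.pyGet? _ ((0 : Int) + (k : Int)) = _
        rw [zero_add, PySem.List.pyGet?_natCast, List.getElem?_map,
          List.getElem?_eq_getElem hk]
        rfl
      · show PySem.List.pyGet? _ ((0 : Int) + (k : Int)) = _
        rw [zero_add, PySem.List.pyGet?_natCast, List.getElem?_map,
          List.getElem?_eq_getElem hk]
        rfl
  rw [hmatched]
  set hit : PySem.Set Int := jd_tok.foldl (fun hit t =>
    PySem.Set.update
      (PySem.Set.update hit
        ((buildIndex (res.map (fun p => PySem.Set.ofList (PySem.Str.split₀ p)))).getD t []))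
      ((buildIndex ((res.map (fun p => PySem.Set.ofList (PySem.Str.split₀ p))).map
          (fun ts => PySem.Set.ofList (ts.map stemToken)))).getD (stemToken t) []))
    PySem.Set.empty with hhitdef
  -- membership in the hit set
  have hhit : ∀ i : Int, i ∈ hit ↔
      ∃ j : Nat, ∃ _ : j < res.length, i = (j : Int) ∧ c res[j] = true := by
    intro i
    rw [hhitdef, hit_mem]
    simp only [PySem.Set.empty, List.not_mem_nil, false_or]
    constructor
    · rintro ⟨t, ht, hcase | hcase⟩
      · rw [buildIndex_mem] at hcase
        obtain ⟨j, hj, hi, hk⟩ := hcase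
        rw [List.length_map] at hj
        rw [List.getElem_map, PySem.Set.mem_ofList] at hk
        refine ⟨j, hj, hi, ?_⟩
        rw [hcond]
        exact ⟨t, (PySem.Set.mem_ofList _ _).1 ht, Or.inl hk⟩
      · rw [buildIndex_mem] at hcase
        obtain ⟨j, hj, hi, hk⟩ := hcase
        rw [List.length_map, List.length_map] at hj
        rw [List.getElem_map, List.getElem_map, PySem.Set.mem_ofList, List.mem_map] at hk
        obtain ⟨u, hu, hku⟩ := hk
        rw [PySem.Set.mem_ofList] at hu
        refine ⟨j, hj, hi, ?_⟩
        rw [hcond]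
        exact ⟨t, (PySem.Set.mem_ofList _ _).1 ht, Or.inr ⟨u, hu, hku.symm⟩⟩
    · rintro ⟨j, hj, rfl, hcj⟩
      rw [hcond] at hcj
      obtain ⟨t, ht, hcase⟩ := hcj
      refine ⟨t, (PySem.Set.mem_ofList _ _).2 ht, ?_⟩
      cases hcase with
      | inl hk =>
        exact Or.inl ((buildIndex_mem _ _ _).2 ⟨j, by simpa using hj, rfl, by
          rw [List.getElem_map, PySem.Set.mem_ofList]; exact hk⟩)
      | inr hk =>
        obtain ⟨u, hu, hsu⟩ := hk
        exact Or.inr ((buildIndex_mem _ _ _).2 ⟨j, by simpa using hj, rfl, by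
          rw [List.getElem_map, List.getElem_map, PySem.Set.mem_ofList]
          exact List.mem_map.2 ⟨u, (PySem.Set.mem_ofList _ _).2 hu, hsu.symm⟩⟩)
  have hnodup : hit.Nodup := hit_nodup _ _ _ _ (by simp [PySem.Set.empty])
  -- the sorted hit list, named
  have hsorted : PySem.List.sorted hit (fun i => i) =
      ((List.range res.length).filter (fun j : Nat => decide ((j : Int) ∈ hit))).map
        (fun j : Nat => (j : Int)) := by
    apply PySem.List.sorted_eq_of_perm_of_pairwise_lt
    · rw [List.perm_ext_iff_of_nodup
        (List.Nodup.map (fun a b => by exact_mod_cast id) (List.Nodup.filter _ List.nodup_range))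
        hnodup]
      intro a
      simp only [List.mem_map, List.mem_filter, List.mem_range, decide_eq_true_eq]
      constructor
      · rintro ⟨j, ⟨hj, hmem⟩, rfl⟩
        exact hmem
      · intro ha
        obtain ⟨j, hj, rfl, _⟩ := (hhit a).1 ha
        exact ⟨j, ⟨hj, ha⟩, rfl⟩
    · exact List.Pairwise.map _ (fun a b h => by exact_mod_cast h)
        (List.Pairwise.filter _ List.pairwise_lt_range)
  have hLB : (PySem.List.sorted hit (fun i => i)).map
      (fun i => (PySem.List.pyGet? res i).getD "") = res.filter c := by
    rw [hsorted, List.map_map]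
    have : ((fun i => (PySem.List.pyGet? res i).getD "") ∘ (fun j : Nat => (j : Int))) =
        (fun j : Nat => res.getD j "") := by
      funext j
      simp [PySem.List.pyGet?_natCast, List.getD_eq_getElem?_getD]
    rw [this]
    rw [List.filter_congr (q := fun j : Nat => c (res.getD j "")) ?_, filter_range_map]
    intro j hj
    rw [List.mem_range] at hj
    have : ((j : Int) ∈ hit) ↔ c (res.getD j "") = true := by
      rw [hhit]
      constructor
      · rintro ⟨j', hj', hjj, hcj⟩
        have : j = j' := by exact_mod_cast hjj
        subst this
        rwa [List.getD_eq_getElem?_getD, List.getElem?_eq_getElem hj']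
      · intro hcj
        refine ⟨j, hj, rfl, ?_⟩
        rwa [List.getD_eq_getElem?_getD, List.getElem?_eq_getElem hj] at hcj
    show decide ((j : Int) ∈ hit) = c (res.getD j "")
    cases hcv : c (res.getD j "") with
    | true => exact decide_eq_true (this.2 hcv)
    | false => exact decide_eq_false (fun h => by rw [this.1 h] at hcv; cases hcv)
  -- emptiness of the two branch tests agrees
  by_cases hempty : hit.isEmpty = true
  · rw [if_pos hempty]
    rw [List.isEmpty_iff] at hempty
    have : res.filter c = [] := by
      rw [← hLB, hempty]
      simp [PySem.List.sorted_eq_nil_iff]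
    rw [this]
    simp
  · rw [if_neg hempty]
    have hne : hit ≠ [] := by
      intro h; rw [h] at hempty; exact hempty rfl
    have : res.filter c ≠ [] := by
      rw [← hLB]
      simp only [ne_eq, List.map_eq_nil_iff, PySem.List.sorted_eq_nil_iff]
      exact hne
    rw [if_pos this, hLB]

-- ===== VERDICT (by name: the statement is the Claim_ definition above) =====
theorem lexical_prefilter_spec : Claim_equal_lexical_prefilter := by
  intro jd res _
  unfold Spec_lexical_prefilter
  rw [lexical_prefilter_eq_foldl, lexical_prefilter_alt_eq_foldl]
  exact congrArg PySem.Dict.items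
    (List.foldl_ext _ _ _ (fun d term _ => step_eq res d term))
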